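-- pv_equiv track=rewrite | github.com/bingdongni/PaperAgent | paperagent/tools/latex_advanced.py | create_aligned_equations
-- ===== SOURCE A (Python) =====
-- from typing import Dict, Any, List, Optional, Tuple
--
-- def create_aligned_equations(
--
--     equations: List[Tuple[str, str]],
--     label: Optional[str] = None
-- ) -> str:
--     """
--     Create aligned equations
--
--     Args:
--         equations: List of (left_side, right_side) tuples
--         label: Optional label
--
--     Returns:
--         LaTeX aligned equations
--     """
--     latex = []
--     latex.append("\\begin{align}\n")
--
--     for i, (left, right) in enumerate(equations):
--         latex.append(f"  {left} &= {right}")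
--
--         if i == 0 and label:
--             latex.append(f" \\label{{eq:{label}}}")
--
--         if i < len(equations) - 1:
--             latex.append(" \\\\\n")
--         else:
--             latex.append("\n")
--
--     latex.append("\\end{align}\n")
--     return "".join(latex)
-- ===== SOURCE B (Python) =====
-- def create_aligned_equations(equations, label=None):
--     def body(eqs, first):
--         if not eqs:
--             return ""
--         (left, right), rest = eqs[0], eqs[1:]
--         line = f"  {left} &= {right}"
--         if first and label:
--             line += f" \\label{{eq:{label}}}"
--         if rest:
--             return line + " \\\\\n" + body(rest, False)
--         return line + "\n"
--     return "\\begin{align}\n" + body(equations, True) + "\\end{align}\n"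
-- ===== Notes on version B (the rewrite author's own statement) =====
-- stated objective: alternative
-- what changed: Replaces A's indexed accumulator loop (enumerate counter, i==0 label branch, i<len-1 separator branch, list of fragments joined at the end) by a direct structural recursion on the list that builds the body string tail-first, deciding the terminator from whether a tail remains and the label from a 'first' flag.
import Mathlib
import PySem

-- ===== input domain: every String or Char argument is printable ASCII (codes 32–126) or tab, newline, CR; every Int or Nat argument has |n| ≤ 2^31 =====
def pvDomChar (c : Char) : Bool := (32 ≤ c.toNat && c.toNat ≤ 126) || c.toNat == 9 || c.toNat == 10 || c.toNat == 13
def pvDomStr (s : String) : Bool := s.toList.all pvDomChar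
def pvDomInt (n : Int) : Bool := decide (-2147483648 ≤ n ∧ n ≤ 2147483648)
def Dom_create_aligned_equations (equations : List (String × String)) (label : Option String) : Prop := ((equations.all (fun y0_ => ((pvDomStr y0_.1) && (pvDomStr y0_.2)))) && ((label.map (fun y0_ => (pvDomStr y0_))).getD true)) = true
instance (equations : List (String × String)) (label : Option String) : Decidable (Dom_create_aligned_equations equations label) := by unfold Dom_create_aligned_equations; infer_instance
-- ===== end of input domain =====

-- B replaces A's indexed accumulator loop by a structural recursion building the body tail-first (objective: alternative); return values proved equal on all inputs.

-- ===== PORT A =====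

-- Python truthiness of the Optional[str] 'label' (None and "" are falsy)
def pvTruthy (label : Option String) : Bool :=
  match label with
  | none => false
  | some s => s.toList ≠ []

-- the for-loop of A: i is the enumerate counter, n = len(equations), acc the 'latex' list
def caeLoop (n : Int) (label : Option String) : Nat → List (String × String) → List String → List String
  | _, [], acc => acc
  | i, (left, right) :: rest, acc =>
    let acc := acc ++ ["  " ++ left ++ " &= " ++ right]
    let acc := if i == 0 && pvTruthy label then
                 acc ++ [" \\label{eq:" ++ label.getD "" ++ "}"]
               else acc
    let acc := if (i : Int) < n - 1 then acc ++ [" \\\\\n"] else acc ++ ["\n"]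
    caeLoop n label (i + 1) rest acc

def create_aligned_equations (equations : List (String × String)) (label : Option String) : String :=
  let latex : List String := ["\\begin{align}\n"]
  let latex := caeLoop (equations.length : Int) label 0 equations latex
  let latex := latex ++ ["\\end{align}\n"]
  String.join latex

-- ===== PORT B =====

-- B's inner recursive helper 'body': builds the body string by recursion on the list
def caeBody (label : Option String) : List (String × String) → Bool → String
  | [], _ => ""
  | (left, right) :: rest, first =>
    let line := "  " ++ left ++ " &= " ++ right
    let line := if first && pvTruthy label then
                  line ++ " \\label{eq:" ++ label.getD "" ++ "}"
                else line
    match rest with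
    | [] => line ++ "\n"
    | _ :: _ => line ++ " \\\\\n" ++ caeBody label rest false

def create_aligned_equations_alt (equations : List (String × String)) (label : Option String) : String :=
  "\\begin{align}\n" ++ caeBody label equations true ++ "\\end{align}\n"

-- ===== PRECONDITION & SPEC =====
def Spec_create_aligned_equations (equations : List (String × String)) (label : Option String) (out : String) : Prop := out = create_aligned_equations_alt equations label
instance (equations : List (String × String)) (label : Option String) (out : String) : Decidable (Spec_create_aligned_equations equations label out) := by unfold Spec_create_aligned_equations; infer_instance

-- ===== CLAIM (what is proved, stated in full; the proofs are below) =====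
def Claim_equal_create_aligned_equations : Prop := ∀ (equations : List (String × String)) (label : Option String), Dom_create_aligned_equations equations label → Spec_create_aligned_equations equations label (create_aligned_equations equations label)

-- ===== LEMMAS AND PROOFS =====

theorem foldl_append_init (l : List String) : ∀ (a : String),
    l.foldl (· ++ ·) a = a ++ l.foldl (· ++ ·) "" := by
  induction l with
  | nil => intro a; simp
  | cons x xs ih =>
    intro a
    simp only [List.foldl_cons]
    rw [ih (a ++ x), ih ("" ++ x)]
    simp [String.append_assoc]

theorem join_cons (s : String) (l : List String) :
    String.join (s :: l) = s ++ String.join l := by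
  simp only [String.join, List.foldl_cons]
  rw [foldl_append_init]
  simp

theorem join_nil : String.join ([] : List String) = "" := rfl

theorem join_append (a b : List String) :
    String.join (a ++ b) = String.join a ++ String.join b := by
  induction a with
  | nil => simp [join_nil]
  | cons x xs ih => simp [join_cons, ih, String.append_assoc]

theorem join_snoc (l : List String) (s : String) :
    String.join (l ++ [s]) = String.join l ++ s := by
  simp [String.join, List.foldl_append]

theorem caeLoop_cons (n : Int) (label : Option String) (i : Nat) (x : String × String)
    (rest : List (String × String)) (acc : List String) :
    caeLoop n label i (x :: rest) acc =
      caeLoop n label (i + 1) rest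
        (let a := acc ++ ["  " ++ x.1 ++ " &= " ++ x.2]
         let a := if i == 0 && pvTruthy label then
                    a ++ [" \\label{eq:" ++ label.getD "" ++ "}"]
                  else a
         if (i : Int) < n - 1 then a ++ [" \\\\\n"] else a ++ ["\n"]) := rfl

-- the tail of A's loop (i ≥ 1, label branch dead) joins to B's body with first = false
theorem caeLoop_tail (label : Option String) (rest : List (String × String)) :
    ∀ (i : Nat) (acc : List String) (n : Int), 1 ≤ i → n = (i : Int) + rest.length →
    String.join (caeLoop n label i rest acc) =
      String.join acc ++ caeBody label rest false := by
  induction rest with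
  | nil =>
    intro i acc n _ _
    simp [caeLoop, caeBody]
  | cons x rest ih =>
    intro i acc n hi hn
    rw [caeLoop_cons]
    have hne : (i == 0) = false := by simp; omega
    simp only [hne, Bool.false_and, if_false, Bool.false_eq_true]
    cases rest with
    | nil =>
      have hlt : ¬ ((i : Int) < n - 1) := by simp at hn; omega
      rw [if_neg hlt]
      simp [caeLoop, caeBody, join_append, join_cons, join_nil, String.append_assoc]
    | cons y rs =>
      have hlt : (i : Int) < n - 1 := by simp at hn; omega
      rw [if_pos hlt]
      rw [ih (i + 1) _ n (by omega) (by push_cast; simp at hn ⊢; omega)]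
      simp [caeBody, join_append, join_cons, join_nil, String.append_assoc]

theorem cae_eq (equations : List (String × String)) (label : Option String) :
    create_aligned_equations equations label =
    create_aligned_equations_alt equations label := by
  cases equations with
  | nil => cases label <;> rfl
  | cons x rest =>
    show String.join ((caeLoop (((x :: rest).length : Nat) : Int) label 0 (x :: rest) ["\\begin{align}\n"]) ++ ["\\end{align}\n"]) = _
    rw [join_snoc, caeLoop_cons]
    simp only [beq_self_eq_true, Bool.true_and]
    cases rest with
    | nil =>
      have hlt : ¬ (((0 : Nat) : Int) < ((([x] : List (String × String)).length : Nat) : Int) - 1) := by simp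
      rw [if_neg hlt]
      by_cases ht : pvTruthy label = true <;>
        simp [caeLoop, caeBody, create_aligned_equations_alt, ht, join_cons, join_nil, String.append_assoc]
    | cons y rs =>
      have hlt : (((0 : Nat) : Int) < (((x :: y :: rs : List (String × String)).length : Nat) : Int) - 1) := by
        push_cast [List.length_cons]; omega
      rw [if_pos hlt]
      simp only [Nat.zero_add]
      rw [caeLoop_tail label (y :: rs) 1 _ (((x :: y :: rs : List (String × String)).length : Nat) : Int) (by omega) (by push_cast [List.length_cons]; omega)]
      by_cases ht : pvTruthy label = true <;>
        simp [caeBody, create_aligned_equations_alt, ht, join_cons, join_nil, String.append_assoc]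

-- ===== VERDICT (by name: the statement is the Claim_ definition above) =====
theorem create_aligned_equations_spec : Claim_equal_create_aligned_equations := by
  intro equations label _
  exact cae_eq equations label
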